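-- pv_equiv track=rewrite | github.com/sharvari67890-lab/deepfake-detection-project | utils.py | get_explainability_scores
-- ===== SOURCE A (Python) =====
-- def get_explainability_scores(result):
--     """
--     Returns explainability scores for text or media analysis.
--     Scores help show why a content was flagged as fake/scam.
--     Example: keywords indicating security risk or urgency.
--     """
--     scores = {}
--     if "reasons" in result:
--         for keyword in result["reasons"]:
--             kw = keyword.lower()
--             if kw in ["bank", "password", "otp", "verify"]:
--                 scores["Security Keywords"] = 90
--             elif kw in ["urgent", "limited time", "free", "win"]:
--                 scores["Urgency / Offer Words"] = 80
--             else: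
--                 scores[keyword.capitalize()] = 70
--     return scores
-- ===== SOURCE B (Python) =====
-- CATEGORY = {
--     "bank": ("Security Keywords", 90),
--     "password": ("Security Keywords", 90),
--     "otp": ("Security Keywords", 90),
--     "verify": ("Security Keywords", 90),
--     "urgent": ("Urgency / Offer Words", 80),
--     "limited time": ("Urgency / Offer Words", 80),
--     "free": ("Urgency / Offer Words", 80),
--     "win": ("Urgency / Offer Words", 80),
-- }
--
--
-- def get_explainability_scores(result):
--     """
--     Returns explainability scores for text or media analysis.
--     Scores help show why a content was flagged as fake/scam.
--     Example: keywords indicating security risk or urgency.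
--     """
--     def entries(reasons, seen):
--         # Recursively build the score mapping front-to-back; `seen` holds the
--         # keys already emitted, so each key appears once with its first score.
--         if not reasons:
--             return {}
--         keyword, rest = reasons[0], reasons[1:]
--         key, score = CATEGORY.get(keyword.lower(), (keyword.capitalize(), 70))
--         if key in seen:
--             return entries(rest, seen)
--         return {key: score, **entries(rest, seen | {key})}
--
--     if "reasons" not in result:
--         return {}
--     return entries(result["reasons"], frozenset())
-- ===== Notes on version B (the rewrite author's own statement) =====
-- stated objective: alternative
-- what changed: A's dict-mutating loop with a three-way membership branch chain is replaced by a module-level keyword-to-(key,score) lookup table and a recursion over the reasons that builds the mapping front-to-back, skipping keys already recorded in an explicit seen-set (correct because in A each key always carries the same score, so repeated inserts never change the dict).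
import Mathlib
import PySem

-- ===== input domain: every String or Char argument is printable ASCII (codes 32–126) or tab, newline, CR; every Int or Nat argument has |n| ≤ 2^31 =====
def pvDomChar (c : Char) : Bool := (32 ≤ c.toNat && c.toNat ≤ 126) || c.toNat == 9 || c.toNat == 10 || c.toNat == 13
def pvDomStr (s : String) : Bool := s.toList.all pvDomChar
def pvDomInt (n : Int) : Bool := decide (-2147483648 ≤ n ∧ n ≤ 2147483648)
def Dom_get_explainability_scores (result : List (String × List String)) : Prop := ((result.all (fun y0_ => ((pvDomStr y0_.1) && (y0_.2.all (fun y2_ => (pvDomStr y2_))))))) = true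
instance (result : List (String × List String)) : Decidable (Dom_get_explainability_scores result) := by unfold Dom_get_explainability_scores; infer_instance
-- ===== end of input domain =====

-- B replaces A's dict-mutating branch-chain loop by a single keyword→(key,score) lookup table
-- and a recursion over the reasons that builds the mapping front-to-back with an explicit
-- seen-set of already-emitted keys (alternative decomposition; same return value).

-- shared helper: Python str.capitalize() — first char uppercased, rest lowercased; exact on the ASCII domain
def pyCapitalize (s : String) : String :=
  match s.toList with
  | [] => ""
  | c :: cs => String.ofList (PySem.Chars.upperChar c :: PySem.Chars.lower cs)

-- ===== PORT A =====
def get_explainability_scores (result : List (String × List String)) : List (String × Int) :=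
  let res := PySem.Dict.ofList result
  let scores : PySem.Dict String Int := PySem.Dict.empty
  let scores :=
    if res.contains "reasons" then
      (res.getD "reasons" []).foldl (fun scores keyword =>
        let kw := PySem.Str.lower keyword
        if ["bank", "password", "otp", "verify"].contains kw then
          scores.insert "Security Keywords" 90
        else if ["urgent", "limited time", "free", "win"].contains kw then
          scores.insert "Urgency / Offer Words" 80
        else
          scores.insert (pyCapitalize keyword) 70) scores
    else scores
  scores.items

-- ===== PORT B =====
-- the CATEGORY module-level dict literal from Source B
def pvCategory : PySem.Dict String (String × Int) :=
  PySem.Dict.ofList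
    [("bank", ("Security Keywords", 90)),
     ("password", ("Security Keywords", 90)),
     ("otp", ("Security Keywords", 90)),
     ("verify", ("Security Keywords", 90)),
     ("urgent", ("Urgency / Offer Words", 80)),
     ("limited time", ("Urgency / Offer Words", 80)),
     ("free", ("Urgency / Offer Words", 80)),
     ("win", ("Urgency / Offer Words", 80))]

-- entries(reasons, seen) from Source B; the dict literal {key: score, **tail} is exactly
-- the cons (key, score) :: tail because key ∉ keys(tail) (the tail is built with key ∈ seen)
def pvEntries (reasons : List String) (seen : PySem.Set String) : List (String × Int) :=
  match reasons with
  | [] => []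
  | keyword :: rest =>
    let p := pvCategory.getD (PySem.Str.lower keyword) (pyCapitalize keyword, 70)
    if seen.contains p.1 then pvEntries rest seen
    else p :: pvEntries rest (seen.add p.1)

def get_explainability_scores_alt (result : List (String × List String)) : List (String × Int) :=
  if (PySem.Dict.ofList result).contains "reasons" then
    pvEntries ((PySem.Dict.ofList result).getD "reasons" []) PySem.Set.empty
  else []

-- ===== PRECONDITION & SPEC =====
def Spec_get_explainability_scores (result : List (String × List String)) (out : List (String × Int)) : Prop := out = get_explainability_scores_alt result
instance (result : List (String × List String)) (out : List (String × Int)) : Decidable (Spec_get_explainability_scores result out) := by unfold Spec_get_explainability_scores; infer_instance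

-- ===== CLAIM =====
def Claim_equal_get_explainability_scores : Prop := ∀ (result : List (String × List String)), Dom_get_explainability_scores result → Spec_get_explainability_scores result (get_explainability_scores result)

-- ===== LEMMAS AND PROOFS =====

-- the pair B's table lookup produces for one keyword (proof-only abbreviation)
def pvCl (keyword : String) : String × Int :=
  pvCategory.getD (PySem.Str.lower keyword) (pyCapitalize keyword, 70)

-- the score is a function of the emitted key
def pvValOf (key : String) : Int :=
  if key = "Security Keywords" then 90 else if key = "Urgency / Offer Words" then 80 else 70

-- str.lower never produces an uppercase letter …
theorem pv_lowerChar_ne (x c : Char) (hc : PySem.Chars.isupper c = true) :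
    PySem.Chars.lowerChar x ≠ c := by
  unfold PySem.Chars.lowerChar
  intro h
  by_cases hx : PySem.Chars.isupper x = true
  · rw [if_pos hx] at h
    unfold PySem.Chars.isupper at hx hc
    simp [Char.le_def, UInt32.le_iff_toNat_le] at hx hc
    have hxn : 65 ≤ x.toNat ∧ x.toNat ≤ 90 := hx
    have hcn : 65 ≤ c.toNat ∧ c.toNat ≤ 90 := hc
    have := congrArg Char.toNat h
    rw [Char.toNat_ofNat, if_pos (by left; omega)] at this
    omega
  · rw [if_neg hx] at h
    subst h
    exact hx hc

-- … so str.capitalize never produces a string with an uppercase letter past position 0,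
-- in particular never one of the two fixed category keys
theorem pv_cap_ne (s t : String) (c : Char) (hc : PySem.Chars.isupper c = true)
    (hmem : c ∈ t.toList.tail) : pyCapitalize s ≠ t := by
  unfold pyCapitalize
  intro h
  cases hs : s.toList with
  | nil => rw [hs] at h; subst h; simp at hmem
  | cons a as =>
    rw [hs] at h
    have := congrArg String.toList h
    simp [String.toList_ofList] at this
    rw [← this] at hmem
    simp [PySem.Chars.lower] at hmem
    obtain ⟨y, _, hy⟩ := hmem
    exact pv_lowerChar_ne y c hc hy

theorem pv_cap_ne_sec (s : String) : pyCapitalize s ≠ "Security Keywords" :=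
  pv_cap_ne s _ 'K' (by decide) (by decide)

theorem pv_cap_ne_urg (s : String) : pyCapitalize s ≠ "Urgency / Offer Words" :=
  pv_cap_ne s _ 'O' (by decide) (by decide)

theorem pv_tab_mk : pvCategory = PySem.Dict.mk
    [("bank", ("Security Keywords", 90)),
     ("password", ("Security Keywords", 90)),
     ("otp", ("Security Keywords", 90)),
     ("verify", ("Security Keywords", 90)),
     ("urgent", ("Urgency / Offer Words", 80)),
     ("limited time", ("Urgency / Offer Words", 80)),
     ("free", ("Urgency / Offer Words", 80)),
     ("win", ("Urgency / Offer Words", 80))] := by decide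

theorem pvCl_snd (kw : String) : (pvCl kw).2 = pvValOf (pvCl kw).1 := by
  unfold pvCl
  rw [pv_tab_mk]
  simp only [PySem.Dict.getD_eq_get?_getD, PySem.Dict.get?_mk_cons]
  split_ifs <;>
    first
      | rfl
      | (show (70:Int) = pvValOf (pyCapitalize kw)
         unfold pvValOf
         rw [if_neg (pv_cap_ne_sec kw), if_neg (pv_cap_ne_urg kw)])

-- A's loop body inserts exactly the pair B's table lookup returns
theorem pv_step_eq (scores : PySem.Dict String Int) (keyword : String) :
    (let kw := PySem.Str.lower keyword
     if ["bank", "password", "otp", "verify"].contains kw then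
       scores.insert "Security Keywords" 90
     else if ["urgent", "limited time", "free", "win"].contains kw then
       scores.insert "Urgency / Offer Words" 80
     else
       scores.insert (pyCapitalize keyword) 70)
    = scores.insert (pvCl keyword).1 (pvCl keyword).2 := by
  unfold pvCl
  rw [pv_tab_mk]
  simp only [PySem.Dict.getD_eq_get?_getD, PySem.Dict.get?_mk_cons, List.contains_cons,
    List.contains_nil, Bool.or_false]
  split_ifs <;> first | rfl | (exfalso; simp_all [@eq_comm String])

theorem pv_contains_add (seen : PySem.Set String) (k x : String) :
    (seen.add k).contains x = (x == k || seen.contains x) := by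
  unfold PySem.Set.add
  by_cases hk : seen.contains k = true
  · rw [if_pos hk]
    by_cases hx : x = k
    · subst hx; simp; exact (PySem.Set.contains_iff _ _).mp hk
    · simp [hx]
  · rw [if_neg hk]
    show List.contains (seen ++ [k]) x = _
    simp [PySem.Set.contains, Bool.or_comm, List.contains_eq_mem, Bool.beq_eq_decide_eq]

-- loop invariant: A's insert-fold over a dict whose values are determined by their keys
-- appends exactly B's entries produced with seen ~ the keys of the dict
theorem pv_inv (reasons : List String) : ∀ (d : PySem.Dict String Int) (seen : PySem.Set String),
    d.keys.Nodup →
    (∀ p ∈ d.items, p.2 = pvValOf p.1) →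
    (∀ k, seen.contains k = d.contains k) →
    (reasons.foldl (fun sc kw => sc.insert (pvCl kw).1 (pvCl kw).2) d).items
      = d.items ++ pvEntries reasons seen := by
  induction reasons with
  | nil => intro d seen _ _ _; simp [pvEntries]
  | cons kw rest ih =>
    intro d seen hnd hval hseen
    simp only [List.foldl_cons, pvEntries]
    have hpe : (pvCategory.getD (PySem.Str.lower kw) (pyCapitalize kw, 70)) = pvCl kw := rfl
    rw [hpe]
    by_cases hc : seen.contains (pvCl kw).1 = true
    · -- key already present with the same (key-determined) value: the insert is a no-op
      have hdc : d.contains (pvCl kw).1 = true := by rw [← hseen]; exact hc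
      have hins : d.insert (pvCl kw).1 (pvCl kw).2 = d := by
        apply PySem.Dict.ext
        rw [PySem.Dict.items_insert_of_contains _ _ hdc]
        conv_rhs => rw [← List.map_id d.items]
        apply List.map_congr_left
        intro p hp
        simp only [id]
        by_cases hpk : (p.1 == (pvCl kw).1) = true
        · have hp1 : p.1 = (pvCl kw).1 := by simpa using hpk
          have : p.2 = pvValOf p.1 := hval p hp
          rw [if_pos hpk]
          have : p.2 = (pvCl kw).2 := by rw [this, hp1, ← pvCl_snd]
          rw [← hp1, ← this]
        · rw [if_neg hpk]
      rw [hins, if_pos hc]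
      exact ih d seen hnd hval hseen
    · have hdc : d.contains (pvCl kw).1 = false := by
        rw [← hseen]; exact Bool.not_eq_true _ ▸ (by simpa using hc)
      rw [if_neg hc]
      rw [ih (d.insert (pvCl kw).1 (pvCl kw).2) (seen.add (pvCl kw).1)
        (PySem.Dict.nodup_keys_insert _ _ _ hnd)
        (by intro p hp
            rcases (PySem.Dict.mem_items_insert _ _ _ _).mp hp with h1 | h2
            · subst h1; exact pvCl_snd kw
            · exact hval p h2.1)
        (by intro k
            rw [pv_contains_add, PySem.Dict.contains_insert, hseen])]
      rw [PySem.Dict.items_insert_of_not_contains _ _ hdc, List.append_assoc]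
      rfl

-- ===== VERDICT =====
theorem get_explainability_scores_spec : Claim_equal_get_explainability_scores := by
  unfold Claim_equal_get_explainability_scores
  intro result _hdom
  unfold Spec_get_explainability_scores
  unfold get_explainability_scores get_explainability_scores_alt
  by_cases h : (PySem.Dict.ofList result).contains "reasons"
  · simp only [h, if_true]
    have hstep : ∀ (sc : PySem.Dict String Int) kw,
        kw ∈ (PySem.Dict.ofList result).getD "reasons" [] →
        (let k := PySem.Str.lower kw
         if ["bank", "password", "otp", "verify"].contains k then
           sc.insert "Security Keywords" 90
         else if ["urgent", "limited time", "free", "win"].contains k then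
           sc.insert "Urgency / Offer Words" 80
         else
           sc.insert (pyCapitalize kw) 70)
        = sc.insert (pvCl kw).1 (pvCl kw).2 := fun sc kw _ => pv_step_eq sc kw
    rw [PySem.List.foldl_congr_mem _ _ _ _ hstep]
    rw [pv_inv _ PySem.Dict.empty PySem.Set.empty (by simp [pysem])
      (by intro a hb; simp [PySem.Dict.empty] at hb)
      (by intro k; simp [pysem, PySem.Set.empty])]
    rfl
  · simp only [h]
    rfl
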